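-- pv_equiv track=rewrite | github.com/sebastianGehrmann/bottom-up-summary | preprocess_copy.py | make_BIO_tgt
-- ===== SOURCE A (Python) =====
-- from collections import Counter
--
-- def compile_substring(start, end, split):
--     if start == end:
--         return split[start]
--     return " ".join(split[start:end+1])
--
-- def make_BIO_tgt(s, t):
--     # tsplit = t.split()
--     ssplit = s#.split()
--     startix = 0
--     endix = 0
--     matches = []
--     matchstrings = Counter()
--     while endix < len(ssplit):
--         # last check is to make sure that phrases at end can be copied
--         searchstring = compile_substring(startix, endix, ssplit)
--         if searchstring in t \
--             and endix < len(ssplit)-1: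
--             endix +=1
--         else:
--             # only phrases, not words
--             # uncomment the -1 if you only want phrases > len 1
--             if startix >= endix:#-1:
--                 matches.extend(["0"] * (endix-startix + 1))
--                 endix += 1
--             else:
--                 # First one has to be 2 if you want phrases not words
--                 full_string = compile_substring(startix, endix-1, ssplit)
--                 if matchstrings[full_string] >= 1:
--                     matches.extend(["0"]*(endix-startix))
--                 else:
--                     matches.extend(["1"]*(endix-startix))
--                     matchstrings[full_string] +=1
--                 #endix += 1
--             startix = endix
--     return " ".join(matches)
-- ===== SOURCE B (Python) =====
-- def make_BIO_tgt(s, t):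
--     n = len(s)
--     # Pass 1: segmentation. For each segment start i, binary-search the largest
--     # e in [i, n-1] with " ".join(s[i:e+1]) in t (containment is antitone in e,
--     # since each such string is a prefix of the next), then apply the cap rule.
--     segs = []
--     i = 0
--     while i < n:
--         if s[i] not in t:
--             e = i
--         else:
--             # gallop: double the offset until the window no longer occurs in t
--             # (or the end of s is reached), keeping lo at the last good offset
--             lo, step = i, 1
--             while i + step <= n - 1 and " ".join(s[i:i + step + 1]) in t:
--                 lo = i + step
--                 step *= 2
--             hi = n - 1 if i + step > n - 1 else i + step - 1
--             while lo < hi: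
--                 mid = (lo + hi + 1) // 2
--                 if " ".join(s[i:mid + 1]) in t:
--                     lo = mid
--                 else:
--                     hi = mid - 1
--             e = lo + 1 if lo < n - 1 else n - 1
--         segs.append((i, e))
--         i = i + 1 if e == i else e
--     # Pass 2: the copied phrase of each segment (None for single-word segments).
--     phrases = [" ".join(s[i:e]) if e > i else None for (i, e) in segs]
--     # Pass 3: first position of every phrase, then tags; a phrase is "1"
--     # exactly when its first position is its own.
--     first = {}
--     for k, p in enumerate(phrases):
--         if p is not None and p not in first:
--             first[p] = k
--     out = []
--     for k, ((i, e), p) in enumerate(zip(segs, phrases)):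
--         if p is None:
--             out.append("0")
--         else:
--             out.extend(["1" if first[p] == k else "0"] * (e - i))
--     return " ".join(out)
-- ===== Notes on version B (the rewrite author's own statement) =====
-- stated objective: alternative
-- what changed: A's single greedy state machine threading a Counter is replaced by three staged passes: a segmentation pass whose maximal copy window is found by gallop-then-binary-search (window occurrence in t is antitone in window length, each window text being a prefix of the next), a phrase pass, and a first-occurrence-position pass so a phrase is tagged '1' iff its first position in the global phrase list is its own.
import Mathlib
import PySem

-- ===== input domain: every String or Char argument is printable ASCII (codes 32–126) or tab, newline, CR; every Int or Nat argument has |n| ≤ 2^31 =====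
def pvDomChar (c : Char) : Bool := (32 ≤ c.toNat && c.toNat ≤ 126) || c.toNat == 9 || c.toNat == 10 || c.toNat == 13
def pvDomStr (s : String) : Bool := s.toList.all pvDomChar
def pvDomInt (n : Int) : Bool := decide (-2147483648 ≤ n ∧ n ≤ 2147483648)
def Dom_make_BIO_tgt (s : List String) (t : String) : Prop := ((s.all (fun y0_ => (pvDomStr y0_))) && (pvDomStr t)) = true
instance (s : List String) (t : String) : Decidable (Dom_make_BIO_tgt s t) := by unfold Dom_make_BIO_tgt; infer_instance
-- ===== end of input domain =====

-- B replaces A's single greedy state machine by three staged passes — a segmentation pass whose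
-- maximal window is found by GALLOP-THEN-BINARY-SEARCH (the window text occurs in t antitonically
-- in the window length, each being a prefix of the next), a phrase pass, and a tagging pass that
-- marks a phrase "1" iff its first position in the global phrase list is its own; objective:
-- alternative algorithm.

-- ===== PORT A =====
-- measure-decrease facts cited by the ports' decreasing_by (small hand-written terms:
-- the stored definition values must stay lean)
theorem decStep (n e : Int) (h : e < n) : (n - (e + 1)).toNat < (n - e).toNat :=
  (Int.toNat_lt_toNat (Int.sub_pos.mpr h)).mpr (sub_lt_sub_left (lt_add_one e) n)
theorem decSnd (st e : Int) (h : ¬ st ≥ e) : (e - e).toNat < (e - st).toNat :=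
  (Int.toNat_lt_toNat (Int.sub_pos.mpr (not_le.mp h))).mpr (sub_lt_sub_left (not_le.mp h) e)
theorem decLt (n i E : Int) (hi : i < n) (hge : i ≤ E) (hne : ¬ E = i) :
    (n - E).toNat < (n - i).toNat :=
  (Int.toNat_lt_toNat (Int.sub_pos.mpr hi)).mpr
    (sub_lt_sub_left (lt_of_le_of_ne hge (fun hh => hne hh.symm)) n)

def compile_substring (start : Int) (stop : Int) (split : List String) : String :=
  if start = stop then (PySem.List.pyGet? split start).getD ""
  else PySem.Str.join " " (PySem.List.slice split (some start) (some (stop + 1)))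

def loopA (s : List String) (t : String) (startix endix : Int) (matches_ : List String)
    (matchstrings : PySem.Dict String Int) : List String :=
  if _h : endix < (s.length : Int) then
    let searchstring := compile_substring startix endix s
    if PySem.Str.isIn searchstring t = true ∧ endix < (s.length : Int) - 1 then
      loopA s t startix (endix + 1) matches_ matchstrings
    else
      if startix ≥ endix then
        loopA s t (endix + 1) (endix + 1)
          (matches_ ++ List.replicate (endix - startix + 1).toNat "0") matchstrings
      else
        let full_string := compile_substring startix (endix - 1) s
        if matchstrings.getD full_string 0 ≥ 1 then
          loopA s t endix endix (matches_ ++ List.replicate (endix - startix).toNat "0") matchstrings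
        else
          loopA s t endix endix (matches_ ++ List.replicate (endix - startix).toNat "1")
            (matchstrings.insert full_string (matchstrings.getD full_string 0 + 1))
  else matches_
termination_by ((((s.length : Int) - endix).toNat), ((endix - startix).toNat))
decreasing_by
  · exact Prod.Lex.left _ _ (decStep s.length endix _h)
  · exact Prod.Lex.left _ _ (decStep s.length endix _h)
  · exact Prod.Lex.right _ (decSnd startix endix (by assumption))
  · exact Prod.Lex.right _ (decSnd startix endix (by assumption))

def make_BIO_tgt (s : List String) (t : String) : String :=
  PySem.Str.join " " (loopA s t 0 0 [] PySem.Dict.empty)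

-- ===== PORT B =====
-- facts cited by port B's decreasing_by: binary-search midpoint bounds and lower bounds
-- on the segmentation step
theorem midLB (lo hi : Int) (h : lo < hi) : lo < PySem.Int.floordiv (lo + hi + 1) 2 :=
  lt_of_lt_of_le (lt_add_one lo)
    ((PySem.Int.le_floordiv_iff_mul_le (a := lo + hi + 1) (b := 2) (q := lo + 1) two_pos).mpr
      (by rw [mul_two, add_right_comm lo hi 1]
          exact add_le_add le_rfl (Int.add_one_le_iff.mpr h)))
theorem midUB (lo hi : Int) (h : lo < hi) : PySem.Int.floordiv (lo + hi + 1) 2 ≤ hi :=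
  Int.lt_add_one_iff.mp
    ((PySem.Int.floordiv_lt_iff_lt_mul (a := lo + hi + 1) (b := 2) (q := hi + 1) two_pos).mpr
      (by rw [mul_two, add_assoc lo hi 1]
          exact add_lt_add_of_lt_of_le (lt_trans h (lt_add_one hi)) le_rfl))
theorem decMidHi (lo hi : Int) (h : lo < hi) :
    (hi - PySem.Int.floordiv (lo + hi + 1) 2).toNat < (hi - lo).toNat :=
  (Int.toNat_lt_toNat (Int.sub_pos.mpr h)).mpr (sub_lt_sub_left (midLB lo hi h) hi)
theorem decMidLo (lo hi : Int) (h : lo < hi) :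
    (PySem.Int.floordiv (lo + hi + 1) 2 - 1 - lo).toNat < (hi - lo).toNat :=
  (Int.toNat_lt_toNat (Int.sub_pos.mpr h)).mpr
    (sub_lt_sub_right (lt_of_lt_of_le (sub_lt_self _ zero_lt_one) (midUB lo hi h)) lo)

-- inner binary-search loop of the segmentation pass
def bsearchB (s : List String) (t : String) (i lo hi : Int) : Int :=
  if _h : lo < hi then
    if PySem.Str.isIn (PySem.Str.join " "
        (PySem.List.slice s (some i) (some (PySem.Int.floordiv (lo + hi + 1) 2 + 1)))) t = true
    then bsearchB s t i (PySem.Int.floordiv (lo + hi + 1) 2) hi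
    else bsearchB s t i lo (PySem.Int.floordiv (lo + hi + 1) 2 - 1)
  else lo
termination_by (hi - lo).toNat
decreasing_by
  · exact decMidHi lo hi _h
  · exact decMidLo lo hi _h

-- cited by segsB's decreasing_by
theorem bsearchB_ge (s : List String) (t : String) (i lo hi : Int) : lo ≤ bsearchB s t i lo hi := by
  rw [bsearchB]
  split
  · next h =>
    split
    · exact le_trans (le_of_lt (midLB lo hi h)) (bsearchB_ge s t i _ hi)
    · exact bsearchB_ge s t i lo _
  · exact le_rfl
termination_by (hi - lo).toNat
decreasing_by
  · exact decMidLo lo hi (by assumption)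
  · exact decMidHi lo hi (by assumption)

-- gallop: double the offset until the window no longer occurs in t (or the end of s is
-- reached), keeping lo at the last good offset; returns (lo, hi).  The '1 ≤ step' conjunct
-- only makes the recursion total (step is always a positive power of two).
theorem decGallop (n i step : Int) (h1 : 1 ≤ step) (h2 : i + step ≤ n - 1) :
    (n - i - 2 * step).toNat < (n - i - step).toNat :=
  (Int.toNat_lt_toNat
      (sub_sub n i step ▸ Int.sub_pos.mpr
        (lt_of_le_of_lt h2 (sub_lt_self n zero_lt_one)))).mpr
    (sub_lt_sub_left
      ((two_mul step).symm ▸ lt_add_of_pos_left step (lt_of_lt_of_le zero_lt_one h1))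
      (n - i))
def gallopB (s : List String) (t : String) (i lo step : Int) : Int × Int :=
  if _h : 1 ≤ step ∧ i + step ≤ (s.length : Int) - 1 ∧
      PySem.Str.isIn (PySem.Str.join " "
        (PySem.List.slice s (some i) (some (i + step + 1)))) t = true then
    gallopB s t i (i + step) (2 * step)
  else
    (lo, if i + step > (s.length : Int) - 1 then (s.length : Int) - 1 else i + step - 1)
termination_by ((s.length : Int) - i - step).toNat
decreasing_by
  exact decGallop s.length i step _h.1 _h.2.1

-- e for one segment start i: gallop then binary search if the single word occurs, then the cap
def extB (s : List String) (t : String) (i : Int) : Int :=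
  if PySem.Str.isIn ((PySem.List.pyGet? s i).getD "") t = true then
    (if bsearchB s t i (gallopB s t i i 1).1 (gallopB s t i i 1).2 < (s.length : Int) - 1
     then bsearchB s t i (gallopB s t i i 1).1 (gallopB s t i i 1).2 + 1
     else (s.length : Int) - 1)
  else i

-- cited by extB_lb
theorem gallopB_lo_ge (s : List String) (t : String) (i lo step : Int)
    (hls : lo ≤ i + step) : lo ≤ (gallopB s t i lo step).1 := by
  rw [gallopB]
  split
  · next h =>
    exact le_trans hls (gallopB_lo_ge s t i (i + step) (2 * step)
      (add_le_add le_rfl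
        ((two_mul step).symm ▸ le_add_of_nonneg_left (le_trans zero_le_one h.1))))
  · exact le_rfl
termination_by ((s.length : Int) - i - step).toNat
decreasing_by
  rename_i h
  exact decGallop s.length i step h.1 h.2.1

-- cited by segsB's decreasing_by
theorem extB_lb (s : List String) (t : String) (i : Int) (hi : i < (s.length : Int)) :
    i ≤ extB s t i := by
  unfold extB
  split
  · have h0 := gallopB_lo_ge s t i i 1 (le_add_of_nonneg_right zero_le_one)
    have h1 := bsearchB_ge s t i (gallopB s t i i 1).1 (gallopB s t i i 1).2
    split
    · exact le_trans (le_trans h0 h1) (le_add_of_nonneg_right zero_le_one)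
    · exact Int.le_sub_one_of_lt hi
  · exact le_rfl

-- Pass 1: the segment list
def segsB (s : List String) (t : String) (i : Int) : List (Int × Int) :=
  if _hi : i < (s.length : Int) then
    let e := extB s t i
    (i, e) :: segsB s t (if e = i then i + 1 else e)
  else []
termination_by ((s.length : Int) - i).toNat
decreasing_by
  · split
    · next he => exact decStep s.length i _hi
    · next he => exact decLt s.length i _ _hi (extB_lb s t i _hi) he

-- Pass 2: the copied phrase of each segment (none for single-word segments)
def phrasesB (s : List String) (segs : List (Int × Int)) : List (Option String) :=
  segs.map (fun p =>
    if p.1 < p.2 then some (PySem.Str.join " " (PySem.List.slice s (some p.1) (some p.2)))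
    else none)

-- Pass 3a: first position of every phrase (setdefault semantics: the first one wins)
def firstB : List (Option String) → Nat → PySem.Dict String Nat → PySem.Dict String Nat
  | [], _, d => d
  | (none :: rest), k, d => firstB rest (k + 1) d
  | (some q :: rest), k, d =>
    firstB rest (k + 1) (if (d.get? q).isSome then d else d.insert q k)

-- Pass 3b: tags; a phrase is "1" exactly when its first position is its own
def emitB (first : PySem.Dict String Nat) :
    List ((Int × Int) × Option String) → Nat → List String
  | [], _ => []
  | (((i, e), p) :: rest), k =>
    (match p with
     | none => ["0"]
     | some q =>
       List.replicate (e - i).toNat (if first.get? q = some k then "1" else "0"))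
    ++ emitB first rest (k + 1)

def make_BIO_tgt_alt (s : List String) (t : String) : String :=
  let segs := segsB s t 0
  let phrases := phrasesB s segs
  PySem.Str.join " " (emitB (firstB phrases 0 PySem.Dict.empty) (segs.zip phrases) 0)

-- ===== PRECONDITION & SPEC =====
def Spec_make_BIO_tgt (s : List String) (t : String) (out : String) : Prop := out = make_BIO_tgt_alt s t
instance (s : List String) (t : String) (out : String) : Decidable (Spec_make_BIO_tgt s t out) := by unfold Spec_make_BIO_tgt; infer_instance

-- ===== CLAIM (what is proved, stated in full; the proofs are below) =====
def Claim_equal_make_BIO_tgt : Prop := ∀ (s : List String) (t : String), Dom_make_BIO_tgt s t → Spec_make_BIO_tgt s t (make_BIO_tgt s t)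

-- ===== LEMMAS AND PROOFS =====

theorem decStep' (n e : Int) (h : e < n - 1) : (n - (e + 1)).toNat < (n - e).toNat :=
  decStep n e (lt_trans h (sub_lt_self _ zero_lt_one))

-- A's maximal greedy extension, as a proof-side recursion (mirrors A's inner behaviour)
def extendMatch (s : List String) (t : String) (e : Int) (cur : String) : Int :=
  if _h : PySem.Str.isIn cur t = true ∧ e < (s.length : Int) - 1 then
    extendMatch s t (e + 1) (cur ++ " " ++ (PySem.List.pyGet? s (e + 1)).getD "")
  else e
termination_by ((s.length : Int) - e).toNat
decreasing_by exact decStep' s.length e _h.2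

theorem extendMatch_ge (s : List String) (t : String) (e : Int) (cur : String) :
    e ≤ extendMatch s t e cur := by
  unfold extendMatch
  split
  · next h =>
    exact le_trans (le_of_lt (lt_add_one e))
      (extendMatch_ge s t (e + 1) (cur ++ " " ++ (PySem.List.pyGet? s (e + 1)).getD ""))
  · exact le_rfl
termination_by ((s.length : Int) - e).toNat
decreasing_by exact decStep' s.length e (And.right (by assumption))

theorem extendMatch_lt (s : List String) (t : String) (e : Int) (cur : String)
    (hl : e < (s.length : Int)) : extendMatch s t e cur < (s.length : Int) := by
  unfold extendMatch
  split
  · next h =>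
    exact extendMatch_lt s t (e + 1) _ (by omega)
  · exact hl
termination_by ((s.length : Int) - e).toNat
decreasing_by omega

theorem charsJoin_append_singleton (sep : List Char) (q : List Char) :
    ∀ ps : List (List Char), ps ≠ [] →
      PySem.Chars.join sep (ps ++ [q]) = PySem.Chars.join sep ps ++ sep ++ q := by
  intro ps hps
  induction ps with
  | nil => exact absurd rfl hps
  | cons p rest ih =>
    cases rest with
    | nil => simp [PySem.Chars.join_cons_cons, PySem.Chars.join_singleton]
    | cons r rs =>
      rw [show (p :: r :: rs) ++ [q] = p :: r :: (rs ++ [q]) from by simp,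
        PySem.Chars.join_cons_cons,
        show r :: (rs ++ [q]) = (r :: rs) ++ [q] from by simp,
        ih (by simp), PySem.Chars.join_cons_cons]
      simp

theorem strJoin_singleton (x : String) : PySem.Str.join " " [x] = x := by
  apply String.ext
  have h := PySem.Str.toList_join " " [x]
  simp only [List.map_cons, List.map_nil, PySem.Chars.join_singleton] at h
  exact h

theorem strJoin_append_singleton (xs : List String) (y : String) (hxs : xs ≠ []) :
    PySem.Str.join " " (xs ++ [y]) = PySem.Str.join " " xs ++ " " ++ y := by
  apply String.ext
  rw [PySem.Str.toList_join]
  simp only [List.map_append, List.map_cons, List.map_nil]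
  rw [charsJoin_append_singleton _ _ _ (by simpa using hxs)]
  simp [PySem.Str.toList_join]

theorem slice_singleton (s : List String) (i : Int) (h0 : 0 ≤ i) (hl : i < (s.length : Int)) :
    PySem.List.slice s (some i) (some (i + 1)) = [s[i.toNat]'(by omega)] := by
  rw [PySem.List.slice_toNat s h0 (by omega)]
  have h1 : (i + 1).toNat - i.toNat = 1 := by omega
  rw [h1]
  have hlt : i.toNat < s.length := by omega
  rw [List.take_one, List.head?_drop, List.getElem?_eq_getElem hlt]
  rfl

theorem pyGet_in_range (s : List String) (i : Int) (h0 : 0 ≤ i) (hl : i < (s.length : Int)) :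
    (PySem.List.pyGet? s i).getD "" = s[i.toNat]'(by omega) := by
  have hlt : i.toNat < s.length := by omega
  simp [PySem.List.pyGet?, PySem.List.pyIdx?, h0, hl]

theorem compile_eq_join (s : List String) (st e : Int) (h0 : 0 ≤ st) (hse : st ≤ e)
    (hl : e < (s.length : Int)) :
    compile_substring st e s = PySem.Str.join " " (PySem.List.slice s (some st) (some (e + 1))) := by
  unfold compile_substring
  split
  · next heq =>
    subst heq
    rw [slice_singleton s st h0 hl, strJoin_singleton,
      pyGet_in_range s st h0 hl]
  · rfl

theorem slice_succ_right (s : List String) (st e : Int) (h0 : 0 ≤ st) (hse : st ≤ e)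
    (hl : e < (s.length : Int)) :
    PySem.List.slice s (some st) (some (e + 1)) =
      PySem.List.slice s (some st) (some e) ++ [s[e.toNat]'(by omega)] := by
  rw [PySem.List.slice_toNat s h0 (by omega : (0:Int) ≤ e + 1),
    PySem.List.slice_toNat s h0 (by omega : (0:Int) ≤ e)]
  have h1 : (e + 1).toNat - st.toNat = (e.toNat - st.toNat) + 1 := by omega
  rw [h1, List.take_add_one]
  congr 1
  have h2 : (s.drop st.toNat)[e.toNat - st.toNat]? = some (s[e.toNat]'(by omega)) := by
    rw [List.getElem?_drop]
    have h3 : st.toNat + (e.toNat - st.toNat) = e.toNat := by omega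
    rw [h3, List.getElem?_eq_getElem (by omega)]
  rw [h2]
  rfl

theorem length_slice_pos (s : List String) (st e : Int) (h0 : 0 ≤ st) (hse : st < e)
    (hl : e ≤ (s.length : Int)) :
    PySem.List.slice s (some st) (some e) ≠ [] := by
  rw [PySem.List.slice_toNat s h0 (by omega)]
  have : ((s.drop st.toNat).take (e.toNat - st.toNat)).length = e.toNat - st.toNat := by
    simp; omega
  intro hnil
  rw [hnil] at this
  simp at this
  omega

-- the incrementally grown search string equals the recomputed join
theorem compile_step (s : List String) (st e : Int) (h0 : 0 ≤ st) (hse : st ≤ e)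
    (hl : e + 1 < (s.length : Int)) :
    compile_substring st e s ++ " " ++ (PySem.List.pyGet? s (e + 1)).getD "" =
      compile_substring st (e + 1) s := by
  rw [compile_eq_join s st e h0 hse (by omega), compile_eq_join s st (e + 1) h0 (by omega) (by omega),
    slice_succ_right s st (e + 1) h0 (by omega) (by omega),
    strJoin_append_singleton _ _ (length_slice_pos s st (e + 1) h0 (by omega) (by omega)),
    pyGet_in_range s (e + 1) (by omega) (by omega)]

-- window-occurrence predicate: the text of window [i, e] occurs in t
def winP (s : List String) (t : String) (i e : Int) : Bool :=
  PySem.Str.isIn (PySem.Str.join " " (PySem.List.slice s (some i) (some (e + 1)))) t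

-- antitone in e: each window text is a prefix of the next one's
theorem winP_mono_step (s : List String) (t : String) (i e : Int) (h0 : 0 ≤ i) (hse : i ≤ e)
    (hl : e + 1 < (s.length : Int)) (h : winP s t i (e + 1) = true) : winP s t i e = true := by
  unfold winP at *
  rw [← compile_eq_join s i e h0 hse (by omega)] at *
  rw [← compile_eq_join s i (e + 1) h0 (by omega) hl,
    ← compile_step s i e h0 hse hl] at h
  rw [PySem.Str.isIn_iff_infix] at *
  refine List.IsInfix.trans ?_ h
  apply List.IsPrefix.isInfix
  rw [String.toList_append, String.toList_append]
  exact ⟨" ".toList ++ ((PySem.List.pyGet? s (e + 1)).getD "").toList,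
    (List.append_assoc _ _ _).symm⟩

theorem winP_mono (s : List String) (t : String) (i a b : Int) (h0 : 0 ≤ i) (hia : i ≤ a)
    (hab : a ≤ b) (hl : b < (s.length : Int)) (h : winP s t i b = true) : winP s t i a = true := by
  by_cases hq : a = b
  · subst hq; exact h
  · have hab' : a + 1 ≤ b := by omega
    exact winP_mono (s := s) (t := t) i a (b - 1) h0 hia (by omega) (by omega)
      (winP_mono_step s t i (b - 1) h0 (by omega) (by omega) (by simpa using h))
termination_by (b - a).toNat
decreasing_by omega

-- after galloping from a good offset, (lo, hi) brackets the maximal window: winP holds at lo,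
-- and hi is the last index or the last one before a failing window
theorem gallopB_spec (s : List String) (t : String) (i lo step : Int) (h0 : 0 ≤ i)
    (hstep : 1 ≤ step) (hlo : i ≤ lo) (hlon : lo ≤ (s.length : Int) - 1)
    (hls : lo < i + step) (hPlo : winP s t i lo = true) :
    i ≤ (gallopB s t i lo step).1 ∧
      (gallopB s t i lo step).1 ≤ (gallopB s t i lo step).2 ∧
      (gallopB s t i lo step).2 ≤ (s.length : Int) - 1 ∧
      winP s t i (gallopB s t i lo step).1 = true ∧
      ((gallopB s t i lo step).2 = (s.length : Int) - 1 ∨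
        winP s t i ((gallopB s t i lo step).2 + 1) = false) := by
  rw [gallopB]
  by_cases h : 1 ≤ step ∧ i + step ≤ (s.length : Int) - 1 ∧
      PySem.Str.isIn (PySem.Str.join " "
        (PySem.List.slice s (some i) (some (i + step + 1)))) t = true
  · simp only [dif_pos h]
    exact gallopB_spec s t i (i + step) (2 * step) h0 (by omega) (by omega) h.2.1
      (by omega) h.2.2
  · simp only [dif_neg h]
    by_cases hend : i + step > (s.length : Int) - 1
    · simp only [if_pos hend]
      exact ⟨hlo, by omega, le_rfl, hPlo, Or.inl (by simp)⟩
    · simp only [if_neg hend]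
      refine ⟨hlo, by omega, by omega, hPlo, Or.inr ?_⟩
      have hfail : ¬ PySem.Str.isIn (PySem.Str.join " "
          (PySem.List.slice s (some i) (some (i + step + 1)))) t = true := by
        intro hc
        exact h ⟨hstep, by omega, hc⟩
      have harith : i + step - 1 + 1 + 1 = i + step + 1 := by omega
      unfold winP
      rw [harith]
      simpa using hfail
termination_by ((s.length : Int) - i - step).toNat
decreasing_by omega

-- binary search returns the largest e in [lo, hi] whose window occurs (given winP at lo)
theorem bsearchB_spec (s : List String) (t : String) (i lo hi : Int)
    (hle : lo ≤ hi) (hPlo : winP s t i lo = true) :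
    lo ≤ bsearchB s t i lo hi ∧ bsearchB s t i lo hi ≤ hi ∧
      winP s t i (bsearchB s t i lo hi) = true ∧
      (bsearchB s t i lo hi < hi → winP s t i (bsearchB s t i lo hi + 1) = false) := by
  rw [bsearchB]
  by_cases h : lo < hi
  · simp only [dif_pos h]
    have hmlb := midLB lo hi h
    have hmub := midUB lo hi h
    by_cases hc : PySem.Str.isIn (PySem.Str.join " "
        (PySem.List.slice s (some i) (some (PySem.Int.floordiv (lo + hi + 1) 2 + 1)))) t = true
    · simp only [if_pos hc]
      have ih := bsearchB_spec s t i (PySem.Int.floordiv (lo + hi + 1) 2) hi (by omega) hc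
      exact ⟨by omega, ih.2.1, ih.2.2.1, ih.2.2.2⟩
    · simp only [if_neg hc]
      have ih := bsearchB_spec s t i lo (PySem.Int.floordiv (lo + hi + 1) 2 - 1)
        (by omega) hPlo
      refine ⟨ih.1, by omega, ih.2.2.1, ?_⟩
      intro _
      by_cases hr2 : bsearchB s t i lo (PySem.Int.floordiv (lo + hi + 1) 2 - 1) <
          PySem.Int.floordiv (lo + hi + 1) 2 - 1
      · exact ih.2.2.2 hr2
      · have hreq : bsearchB s t i lo (PySem.Int.floordiv (lo + hi + 1) 2 - 1) =
            PySem.Int.floordiv (lo + hi + 1) 2 - 1 := by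
          have := ih.2.1; omega
        rw [hreq]
        have h1 : PySem.Int.floordiv (lo + hi + 1) 2 - 1 + 1 =
            PySem.Int.floordiv (lo + hi + 1) 2 := by omega
        rw [h1]
        unfold winP
        simpa using hc
  · simp only [dif_neg h]
    exact ⟨le_rfl, hle, hPlo, by omega⟩
termination_by (hi - lo).toNat
decreasing_by
  · exact decMidHi lo hi h
  · exact decMidLo lo hi h

-- the greedy extension, characterised: from e it runs to the goal min(n-1, first failure)
theorem extendMatch_to_tgt (s : List String) (t : String) (i r e : Int) (h0 : 0 ≤ i)
    (hir : i ≤ r) (hrl : r < (s.length : Int))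
    (hPr : winP s t i r = true) (hfail : r < (s.length : Int) - 1 → winP s t i (r + 1) = false)
    (tgt : Int)
    (htar : tgt = if r < (s.length : Int) - 1 then r + 1 else (s.length : Int) - 1)
    (hie : i ≤ e) (het : e ≤ tgt) :
    extendMatch s t e (compile_substring i e s) = tgt := by
  have htle : tgt ≤ (s.length : Int) - 1 := by split at htar <;> omega
  by_cases heq : e = tgt
  · have hstop : ¬ (PySem.Str.isIn (compile_substring i e s) t = true ∧
        e < (s.length : Int) - 1) := by
      intro hcond
      rw [heq] at hcond
      by_cases hcase : r < (s.length : Int) - 1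
      · rw [if_pos hcase] at htar
        have hP := hfail hcase
        have hPF : winP s t i tgt = false := by rw [htar]; exact hP
        unfold winP at hPF
        rw [← compile_eq_join s i tgt h0 (by omega) (by omega)] at hPF
        rw [hPF] at hcond
        exact absurd hcond.1 (by simp)
      · rw [if_neg hcase] at htar
        omega
    rw [extendMatch, dif_neg hstop]
    exact heq
  · have hel : e < tgt := by omega
    have hen : e < (s.length : Int) - 1 := by omega
    have her : e ≤ r := by split at htar <;> omega
    rw [extendMatch]
    have hPe : winP s t i e = true :=
      winP_mono s t i e r h0 hie her hrl hPr
    have hcond : PySem.Str.isIn (compile_substring i e s) t = true ∧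
        e < (s.length : Int) - 1 := by
      refine ⟨?_, hen⟩
      unfold winP at hPe
      rw [← compile_eq_join s i e h0 hie (by omega)] at hPe
      exact hPe
    rw [dif_pos hcond, compile_step s i e h0 hie (by omega)]
    exact extendMatch_to_tgt s t i r (e + 1) h0 hir hrl hPr hfail tgt htar (by omega)
      (by omega)
termination_by (tgt - e).toNat
decreasing_by omega

-- B's binary-searched segment end equals A's greedy extension
theorem extB_eq_extendMatch (s : List String) (t : String) (i : Int) (h0 : 0 ≤ i)
    (hi : i < (s.length : Int)) :
    extB s t i = extendMatch s t i (compile_substring i i s) := by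
  have hcomp : compile_substring i i s = (PySem.List.pyGet? s i).getD "" := by
    unfold compile_substring; rw [if_pos rfl]
  have hsingle : winP s t i i = PySem.Str.isIn ((PySem.List.pyGet? s i).getD "") t := by
    unfold winP
    rw [← compile_eq_join s i i h0 le_rfl hi, hcomp]
  unfold extB
  by_cases hP : PySem.Str.isIn ((PySem.List.pyGet? s i).getD "") t = true
  · rw [if_pos hP]
    obtain ⟨g1, g2, g3, g4, g5⟩ := gallopB_spec s t i i 1 h0 le_rfl le_rfl (by omega)
      (by omega) (by rw [hsingle]; exact hP)
    obtain ⟨h1, h2, h3, h4⟩ := bsearchB_spec s t i (gallopB s t i i 1).1 (gallopB s t i i 1).2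
      g2 g4
    have hfail : bsearchB s t i (gallopB s t i i 1).1 (gallopB s t i i 1).2 <
        (s.length : Int) - 1 →
        winP s t i (bsearchB s t i (gallopB s t i i 1).1 (gallopB s t i i 1).2 + 1) = false := by
      intro hlt
      by_cases hr : bsearchB s t i (gallopB s t i i 1).1 (gallopB s t i i 1).2 <
          (gallopB s t i i 1).2
      · exact h4 hr
      · have hreq : bsearchB s t i (gallopB s t i i 1).1 (gallopB s t i i 1).2 =
            (gallopB s t i i 1).2 := by omega
        rcases g5 with g5 | g5
        · omega
        · rw [hreq]; exact g5
    rw [extendMatch_to_tgt s t i (bsearchB s t i (gallopB s t i i 1).1 (gallopB s t i i 1).2)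
      i h0 (by omega) (by omega) h3 hfail _ rfl le_rfl (by split <;> omega)]
  · rw [if_neg hP]
    rw [extendMatch, dif_neg]
    rw [hcomp]
    intro hcond
    exact hP hcond.1

-- A's loop, run from a segment start (st, st), equals: extend maximally, emit, continue
theorem loopA_seg (s : List String) (t : String) (st e : Int) (m : List String)
    (ms : PySem.Dict String Int) (h0 : 0 ≤ st) (hse : st ≤ e) (hl : e < (s.length : Int)) :
    loopA s t st e m ms =
      (if extendMatch s t e (compile_substring st e s) = st then
         loopA s t (st + 1) (st + 1) (m ++ ["0"]) ms
       else if ms.getD (compile_substring st (extendMatch s t e (compile_substring st e s) - 1) s)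
           0 ≥ 1 then
         loopA s t (extendMatch s t e (compile_substring st e s))
           (extendMatch s t e (compile_substring st e s))
           (m ++ List.replicate (extendMatch s t e (compile_substring st e s) - st).toNat "0") ms
       else
         loopA s t (extendMatch s t e (compile_substring st e s))
           (extendMatch s t e (compile_substring st e s))
           (m ++ List.replicate (extendMatch s t e (compile_substring st e s) - st).toNat "1")
           (ms.insert (compile_substring st (extendMatch s t e (compile_substring st e s) - 1) s)
             (ms.getD (compile_substring st (extendMatch s t e (compile_substring st e s) - 1) s)
               0 + 1))) := by
  rw [loopA]
  simp only [hl, dite_true]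
  by_cases hc : PySem.Str.isIn (compile_substring st e s) t = true ∧ e < (s.length : Int) - 1
  · rw [if_pos hc]
    rw [loopA_seg s t st (e + 1) m ms h0 (by omega) (by omega)]
    have hE : extendMatch s t e (compile_substring st e s) =
        extendMatch s t (e + 1) (compile_substring st (e + 1) s) := by
      conv_lhs => rw [extendMatch]
      rw [dif_pos hc, compile_step s st e h0 hse (by omega)]
    rw [hE]
  · rw [if_neg hc]
    have hE : extendMatch s t e (compile_substring st e s) = e := by
      rw [extendMatch, dif_neg hc]
    rw [hE]
    by_cases hge : st ≥ e
    · have hste : st = e := by omega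
      rw [if_pos hge, if_pos (by omega : e = st)]
      have : (e - st + 1).toNat = 1 := by omega
      rw [this]
      subst hste
      rfl
    · rw [if_neg hge, if_neg (by omega : ¬ e = st)]
termination_by (((s.length : Int) - e)).toNat
decreasing_by omega

-- the A-side multi-word phrase equals B's slice join
theorem phrase_eq (s : List String) (i E : Int) (h0 : 0 ≤ i) (hiE : i < E)
    (hl : E < (s.length : Int)) :
    compile_substring i (E - 1) s =
      PySem.Str.join " " (PySem.List.slice s (some i) (some E)) := by
  have := compile_eq_join s i (E - 1) h0 (by omega) (by omega)
  rw [this]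
  norm_num

-- first-occurrence test: with allph = pre ++ p :: suf, index? hits pre.length iff p is new
theorem index?_at_boundary {α : Type} [BEq α] [LawfulBEq α] (pre suf : List α) (p : α) :
    (PySem.List.index? (pre ++ p :: suf) p = some pre.length) ↔ p ∉ pre := by
  constructor
  · intro h hmem
    obtain ⟨pre2, suf2, heq, hlen, hnot⟩ := (PySem.List.index?_eq_some_iff _ _ _).mp h
    have := List.append_inj heq.symm hlen
    exact hnot (this.1 ▸ hmem)
  · intro hnot
    exact (PySem.List.index?_eq_some_iff _ _ _).mpr ⟨pre, suf, rfl, rfl, hnot⟩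

-- firstB really is the first-position map
theorem firstB_get? (phs : List (Option String)) (k : Nat) (d : PySem.Dict String Nat)
    (str : String) :
    (firstB phs k d).get? str =
      (d.get? str).or ((PySem.List.index? phs (some str)).map (· + k)) := by
  induction phs generalizing k d with
  | nil =>
    cases hd : d.get? str <;> simp [firstB, PySem.List.index?_eq_idxOf?, hd]
  | cons p rest ih =>
    cases p with
    | none =>
      rw [firstB, ih, PySem.List.index?_cons_of_ne _ (by simp)]
      cases d.get? str <;> cases PySem.List.index? rest (some str) <;>
        simp [Nat.add_assoc, Nat.add_comm 1 k]
    | some q =>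
      by_cases hq : q = str
      · subst hq
        rw [firstB]
        by_cases hd : (d.get? q).isSome
        · rw [if_pos hd, ih]
          obtain ⟨v, hv⟩ := Option.isSome_iff_exists.mp hd
          simp [hv]
        · rw [if_neg hd, ih, PySem.Dict.get?_insert_self,
            PySem.List.index?_cons_self]
          rw [Option.not_isSome_iff_eq_none] at hd
          simp [hd]
      · rw [firstB, ih, PySem.List.index?_cons_of_ne _ (by simp [hq])]
        have hget : ∀ d' : PySem.Dict String Nat,
            ((if ((d' : PySem.Dict String Nat).get? q).isSome then d' else d'.insert q k).get? str)
              = d'.get? str := by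
          intro d'
          split
          · rfl
          · exact PySem.Dict.get?_insert_of_ne d' k (fun h => hq h.symm)
        rw [hget]
        cases d.get? str <;> cases PySem.List.index? rest (some str) <;>
        simp [Nat.add_assoc, Nat.add_comm 1 k]

-- main correspondence: A's Counter-threaded loop from segment start i equals B's staged emission
theorem loopA_eq_emitB (s : List String) (t : String) (i : Int) (m : List String)
    (ms : PySem.Dict String Int) (allph pre : List (Option String)) (h0 : 0 ≤ i)
    (hglob : allph = pre ++ phrasesB s (segsB s t i))
    (hms : ∀ p : String, 0 ≤ ms.getD p 0 ∧ (1 ≤ ms.getD p 0 ↔ (some p) ∈ pre)) :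
    loopA s t i i m ms =
      m ++ emitB (firstB allph 0 PySem.Dict.empty) ((segsB s t i).zip (phrasesB s (segsB s t i))) pre.length := by
  by_cases hi : i < (s.length : Int)
  · rw [loopA_seg s t i i m ms h0 le_rfl hi,
      ← extB_eq_extendMatch s t i h0 hi]
    have hgeE : i ≤ extB s t i := extB_lb s t i hi
    have hltE : extB s t i < (s.length : Int) := by
      rw [extB_eq_extendMatch s t i h0 hi]
      exact extendMatch_lt s t i _ hi
    by_cases hEi : extB s t i = i
    · -- single-word segment: "0", advance by one
      have hsegs : segsB s t i = (i, extB s t i) :: segsB s t (i + 1) := by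
        rw [segsB]; simp only [dif_pos hi, if_pos hEi]
      have hph : phrasesB s (segsB s t i) = none :: phrasesB s (segsB s t (i + 1)) := by
        rw [hsegs, phrasesB, List.map_cons]
        rw [if_neg (by simp only [hEi]; omega)]
        rfl
      rw [if_pos hEi]
      rw [loopA_eq_emitB s t (i + 1) (m ++ ["0"]) ms allph (pre ++ [none]) (by omega)
        (by rw [hglob, hph, List.append_assoc]; rfl)
        (by intro p; refine ⟨(hms p).1, ?_⟩; rw [(hms p).2]; simp)]
      rw [hph, hsegs, List.zip_cons_cons, emitB]
      simp [List.append_assoc]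
    · -- multi-word segment
      have hiE : i < extB s t i := by omega
      have hsegs : segsB s t i = (i, extB s t i) :: segsB s t (extB s t i) := by
        rw [segsB]; simp only [dif_pos hi, if_neg hEi]
      have hstr : compile_substring i (extB s t i - 1) s =
          PySem.Str.join " " (PySem.List.slice s (some i) (some (extB s t i))) :=
        phrase_eq s i (extB s t i) h0 hiE hltE
      have hph : phrasesB s (segsB s t i) =
          some (PySem.Str.join " " (PySem.List.slice s (some i) (some (extB s t i)))) ::
            phrasesB s (segsB s t (extB s t i)) := by
        rw [hsegs, phrasesB, List.map_cons, if_pos hiE]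
        rfl
      rw [if_neg hEi, hstr]
      set str := PySem.Str.join " " (PySem.List.slice s (some i) (some (extB s t i))) with hstrdef
      have hallph : allph = pre ++ some str :: phrasesB s (segsB s t (extB s t i)) := by
        rw [hglob, hph]
      have hidx : ((firstB allph 0 PySem.Dict.empty).get? str = some pre.length) ↔
          (some str) ∉ pre := by
        rw [firstB_get?, PySem.Dict.get?_empty]
        have hmap : (PySem.List.index? allph (some str)).map (· + 0) =
            PySem.List.index? allph (some str) := by
          cases PySem.List.index? allph (some str) <;> simp
        rw [Option.none_or, hmap, hallph]
        exact index?_at_boundary pre _ (some str)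
      rw [hph, hsegs, List.zip_cons_cons, emitB]
      by_cases hseen : ms.getD str 0 ≥ 1
      · rw [if_pos hseen]
        have hmem : (some str) ∈ pre := ((hms str).2).mp hseen
        have hnidx : ¬ ((firstB allph 0 PySem.Dict.empty).get? str = some pre.length) := by
          rw [hidx]; exact fun h => h hmem
        rw [loopA_eq_emitB s t (extB s t i) (m ++ List.replicate (extB s t i - i).toNat "0")
          ms allph (pre ++ [some str]) (by omega)
          (by rw [hallph, List.append_assoc]; rfl)
          (by
            intro p
            refine ⟨(hms p).1, ?_⟩
            rw [(hms p).2]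
            constructor
            · intro hp; exact List.mem_append_left _ hp
            · intro hp
              rcases List.mem_append.mp hp with hp | hp
              · exact hp
              · simp at hp
                subst hp
                exact hmem)]
        simp only [if_neg hnidx]
        simp [List.append_assoc]
      · rw [if_neg hseen]
        have hmem : (some str) ∉ pre := fun h => hseen (((hms str).2).mpr h)
        have hidx' : (firstB allph 0 PySem.Dict.empty).get? str = some pre.length :=
          hidx.mpr hmem
        have hnn : 0 ≤ ms.getD str 0 := (hms str).1
        rw [loopA_eq_emitB s t (extB s t i) (m ++ List.replicate (extB s t i - i).toNat "1")
          (ms.insert str (ms.getD str 0 + 1)) allph (pre ++ [some str]) (by omega)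
          (by rw [hallph, List.append_assoc]; rfl)
          (by
            intro p
            rw [PySem.Dict.getD_insert]
            by_cases hp : p = str
            · rw [if_pos hp]
              refine ⟨by omega, ?_⟩
              constructor
              · intro _; exact List.mem_append_right _ (by simp [hp])
              · intro _; omega
            · rw [if_neg hp]
              refine ⟨(hms p).1, ?_⟩
              rw [(hms p).2]
              constructor
              · intro hq; exact List.mem_append_left _ hq
              · intro hq
                rcases List.mem_append.mp hq with hq | hq
                · exact hq
                · simp at hq
                  exact absurd hq.symm (fun h => hp h.symm))]
        simp only [if_pos hidx']
        simp [List.append_assoc]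
  · rw [loopA, segsB]
    simp only [dif_neg hi]
    rw [phrasesB]
    simp [emitB]
termination_by ((s.length : Int) - i).toNat
decreasing_by
  · omega
  · exact decLt s.length i (extB s t i) (by assumption) (by assumption) (by assumption)
  · exact decLt s.length i (extB s t i) (by assumption) (by assumption) (by assumption)

-- ===== VERDICT (by name: the statement is the Claim_ definition above) =====
theorem make_BIO_tgt_spec : Claim_equal_make_BIO_tgt := by
  intro s t _
  unfold Spec_make_BIO_tgt make_BIO_tgt make_BIO_tgt_alt
  congr 1
  rw [loopA_eq_emitB s t 0 [] PySem.Dict.empty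
    (phrasesB s (segsB s t 0)) [] le_rfl (by simp)
    (by intro p; rw [PySem.Dict.getD_empty]; exact ⟨le_rfl, by simp⟩)]
  rfl
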